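-- pv_equiv track=rewrite | github.com/BartWesthoff/snacs-sampling | algorithms/snowball.py | snowball_sampling
-- ===== SOURCE A (Python) =====
-- def snowball_sampling(neighbors_dict, seed_node, depth=2):
--     """
--     Perform snowball sampling using a neighbors dictionary.
--
--     Parameters:
--         neighbors_dict (dict): A dictionary where keys are nodes, and values are sets of neighbors.
--         seed_node (int/str): The starting node for sampling.
--         depth (int): The number of layers to expand.
--
--     Returns:
--         set: A set of nodes included in the sampled subgraph.
--     """
--     sampled_nodes = set([seed_node])  # Start with the seed node
--     current_layer = set([seed_node])
--
--     for _ in range(depth):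
--         next_layer = set()
--         for node in current_layer:
--             next_layer.update(neighbors_dict.get(node, []))  # Add neighbors of current node
--         next_layer -= sampled_nodes  # Avoid revisiting nodes
--         sampled_nodes.update(next_layer)
--         current_layer = next_layer  # Move to the next layer
--
--     return sampled_nodes
-- ===== SOURCE B (Python) =====
-- from collections import deque
--
--
-- def snowball_sampling(neighbors_dict, seed_node, depth=2):
--     visited = {seed_node}
--     queue = deque([(seed_node, 0)])
--     while queue:
--         node, d = queue.popleft()
--         if d < depth:
--             for nb in neighbors_dict.get(node, []):
--                 if nb not in visited:
--                     visited.add(nb)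
--                     queue.append((nb, d + 1))
--     return visited
-- ===== Notes on version B (the rewrite author's own statement) =====
-- stated objective: alternative
-- what changed: Replaced the layer-by-layer frontier expansion (rebuilding a whole next-layer set each round and subtracting the sampled set) by a single queue-driven BFS with explicit depth labels: nodes are pushed onto a deque with their depth, marked visited at enqueue time, and expanded only while their depth is below the limit.
import Mathlib
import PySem

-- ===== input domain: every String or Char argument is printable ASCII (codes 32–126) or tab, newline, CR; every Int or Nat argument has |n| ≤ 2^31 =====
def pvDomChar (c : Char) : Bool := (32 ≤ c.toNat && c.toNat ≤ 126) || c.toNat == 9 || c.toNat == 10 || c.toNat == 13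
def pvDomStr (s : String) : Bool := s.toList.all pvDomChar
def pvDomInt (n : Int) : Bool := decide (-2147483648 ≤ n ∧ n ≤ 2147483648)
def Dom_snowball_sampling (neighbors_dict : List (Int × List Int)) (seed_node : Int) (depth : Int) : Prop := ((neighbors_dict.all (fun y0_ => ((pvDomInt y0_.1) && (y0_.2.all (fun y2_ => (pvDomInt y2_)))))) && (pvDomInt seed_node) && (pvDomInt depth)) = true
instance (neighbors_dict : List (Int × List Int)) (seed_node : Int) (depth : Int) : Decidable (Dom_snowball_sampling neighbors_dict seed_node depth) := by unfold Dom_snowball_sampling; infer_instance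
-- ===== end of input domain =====

-- B replaces A's layer-by-layer frontier rebuilding by a single queue-driven BFS with
-- depth labels, marking nodes visited at enqueue time (objective: alternative).
-- Both return a Python set; equality of the ports is on the Lean insertion-order lists.

-- ===== PORT A =====

-- neighbors_dict.get(node, []) : first matching key of the association list
def pvGetNbrs (nd : List (Int × List Int)) (node : Int) : List Int :=
  match nd.find? (fun p => p.1 == node) with
  | some p => p.2
  | none => []

-- the body of A's 'for _ in range(depth)' loop; state = (sampled_nodes, current_layer)
def pvStepA (nd : List (Int × List Int)) (st : PySem.Set Int × PySem.Set Int) :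
    PySem.Set Int × PySem.Set Int :=
  let next0 : PySem.Set Int :=
    st.2.foldl (fun nl node => PySem.Set.update nl (pvGetNbrs nd node)) PySem.Set.empty
  let next := PySem.Set.diff next0 st.1
  (PySem.Set.update st.1 next, next)

def snowball_sampling (neighbors_dict : List (Int × List Int)) (seed_node : Int) (depth : Int) : List Int :=
  ((PySem.List.pyRange 0 depth 1).foldl (fun st _ => pvStepA neighbors_dict st)
    (PySem.Set.ofList [seed_node], PySem.Set.ofList [seed_node])).1

-- ===== PORT B =====

-- the 'while queue:' loop; fuel is only a totality guard (one unit per pop)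
def pvBfsGo (nd : List (Int × List Int)) (depth : Int) :
    Nat → List (Int × Int) → PySem.Set Int → List Int
  | 0, _, visited => visited
  | _+1, [], visited => visited
  | fuel+1, (node, d) :: rest, visited =>
    if d < depth then
      let st := (pvGetNbrs nd node).foldl
        (fun (st : List (Int × Int) × PySem.Set Int) nb =>
          if nb ∈ st.2 then st else (st.1 ++ [(nb, d + 1)], PySem.Set.add st.2 nb))
        (rest, visited)
      pvBfsGo nd depth fuel st.1 st.2
    else pvBfsGo nd depth fuel rest visited

def snowball_sampling_alt (neighbors_dict : List (Int × List Int)) (seed_node : Int) (depth : Int) : List Int :=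
  -- fuel = 1 + depth⁺ * (total neighbor-list length) bounds the number of pops (proved below)
  pvBfsGo neighbors_dict depth
    (1 + depth.toNat * (neighbors_dict.flatMap (fun p => p.2)).length)
    [(seed_node, 0)] (PySem.Set.ofList [seed_node])

-- ===== PRECONDITION & SPEC =====
def Spec_snowball_sampling (neighbors_dict : List (Int × List Int)) (seed_node : Int) (depth : Int) (out : List Int) : Prop := out = snowball_sampling_alt neighbors_dict seed_node depth
instance (neighbors_dict : List (Int × List Int)) (seed_node : Int) (depth : Int) (out : List Int) : Decidable (Spec_snowball_sampling neighbors_dict seed_node depth out) := by unfold Spec_snowball_sampling; infer_instance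

-- ===== CLAIM (what is proved, stated in full; the proofs are below) =====
def Claim_equal_snowball_sampling : Prop := ∀ (neighbors_dict : List (Int × List Int)) (seed_node : Int) (depth : Int), Dom_snowball_sampling neighbors_dict seed_node depth → Spec_snowball_sampling neighbors_dict seed_node depth (snowball_sampling neighbors_dict seed_node depth)

-- ===== LEMMAS AND PROOFS =====

-- the new (previously unvisited) nodes contributed by one neighbor list, in discovery order
def pvNewOf (v : List Int) : List Int → List Int
  | [] => []
  | nb :: nbs => if nb ∈ v then pvNewOf v nbs else nb :: pvNewOf (v ++ [nb]) nbs

-- the new nodes contributed by a whole layer of nodes, in discovery order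
def pvLayerNew (nd : List (Int × List Int)) (v : List Int) : List Int → List Int
  | [] => []
  | x :: xs => pvNewOf v (pvGetNbrs nd x) ++
      pvLayerNew nd (v ++ pvNewOf v (pvGetNbrs nd x)) xs

-- A's loop as iteration of pvStepA
def pvLoopA (nd : List (Int × List Int)) :
    Nat → PySem.Set Int × PySem.Set Int → PySem.Set Int × PySem.Set Int
  | 0, st => st
  | k+1, st => pvLoopA nd k (pvStepA nd st)

-- the exact number of pops B performs from a state (visited v, current layer L, k rounds left)
def pvFuelFor (nd : List (Int × List Int)) : Nat → List Int → List Int → Nat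
  | 0, _, L => L.length
  | k+1, v, L => L.length + pvFuelFor nd k (v ++ pvLayerNew nd v L) (pvLayerNew nd v L)

theorem pv_foldl_stepA (nd : List (Int × List Int)) (l : List Int)
    (st : PySem.Set Int × PySem.Set Int) :
    l.foldl (fun st _ => pvStepA nd st) st = pvLoopA nd l.length st := by
  induction l generalizing st with
  | nil => rfl
  | cons x xs ih => simpa [pvLoopA] using ih (pvStepA nd st)

theorem pv_inner_fold (d : Int) (nbs : List Int) : ∀ (q : List (Int × Int)) (v : List Int),
    nbs.foldl
      (fun (st : List (Int × Int) × PySem.Set Int) nb =>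
        if nb ∈ st.2 then st else (st.1 ++ [(nb, d + 1)], PySem.Set.add st.2 nb))
      (q, v)
    = (q ++ (pvNewOf v nbs).map (fun x => (x, d + 1)), v ++ pvNewOf v nbs) := by
  induction nbs with
  | nil => intro q v; simp [pvNewOf]
  | cons nb nbs ih =>
    intro q v
    by_cases h : nb ∈ v
    · simp [pvNewOf, h, ih q v]
    · simp only [List.foldl_cons, if_neg h, pvNewOf,
        PySem.Set.add_of_not_mem h, ih (q ++ [(nb, d + 1)]) (v ++ [nb])]
      simp

theorem pv_bfs_layer (nd : List (Int × List Int)) (depth d : Int) (hd : d < depth)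
    (L : List Int) : ∀ (N v : List Int) (f : Nat),
    pvBfsGo nd depth (L.length + f)
      (L.map (fun x => (x, d)) ++ N.map (fun x => (x, d + 1))) v
    = pvBfsGo nd depth f ((N ++ pvLayerNew nd v L).map (fun x => (x, d + 1)))
        (v ++ pvLayerNew nd v L) := by
  induction L with
  | nil => intro N v f; simp [pvLayerNew]
  | cons x xs ih =>
    intro N v f
    have hlen : (x :: xs).length + f = (xs.length + f) + 1 := by
      simp [List.length_cons]; omega
    rw [hlen]
    simp only [List.map_cons, List.cons_append, pvBfsGo, if_pos hd]
    rw [pv_inner_fold d (pvGetNbrs nd x)]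
    simp only []
    rw [List.append_assoc, ← List.map_append, ih (N ++ pvNewOf v (pvGetNbrs nd x)) (v ++ pvNewOf v (pvGetNbrs nd x)) f]
    simp [pvLayerNew, List.append_assoc]

theorem pv_bfs_drain (nd : List (Int × List Int)) (depth d : Int) (hd : ¬ d < depth)
    (L : List Int) : ∀ (v : List Int) (f : Nat),
    pvBfsGo nd depth (L.length + f) (L.map (fun x => (x, d))) v = v := by
  induction L with
  | nil => intro v f; cases f <;> rfl
  | cons x xs ih =>
    intro v f
    have hlen : (x :: xs).length + f = (xs.length + f) + 1 := by
      simp [List.length_cons]; omega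
    rw [hlen]
    simp only [List.map_cons, pvBfsGo, if_neg hd]
    exact ih v f

theorem pv_diff_append (nl v : List Int) (nb : Int) :
    PySem.Set.diff (nl ++ [nb]) v
    = PySem.Set.diff nl v ++ (if nb ∈ v then [] else [nb]) := by
  by_cases h : nb ∈ v <;> simp [PySem.Set.diff, List.filter_append, h]

theorem pv_diff_update (ns : List Int) : ∀ (nl v : List Int),
    PySem.Set.diff (PySem.Set.update nl ns) v
    = PySem.Set.diff nl v ++ pvNewOf (v ++ PySem.Set.diff nl v) ns := by
  induction ns with
  | nil => intro nl v; simp [PySem.Set.update, pvNewOf]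
  | cons nb ns ih =>
    intro nl v
    rw [PySem.Set.update_cons]
    by_cases hnl : nb ∈ nl
    · rw [PySem.Set.add_of_mem hnl, ih nl v]
      have hmem : nb ∈ v ++ PySem.Set.diff nl v := by
        by_cases hv : nb ∈ v
        · exact List.mem_append_left _ hv
        · exact List.mem_append_right _ ((PySem.Set.mem_diff nl v nb).mpr ⟨hnl, hv⟩)
      simp [pvNewOf, hmem]
    · rw [PySem.Set.add_of_not_mem hnl, ih (nl ++ [nb]) v, pv_diff_append]
      by_cases hv : nb ∈ v
      · have hmem : nb ∈ v ++ PySem.Set.diff nl v := List.mem_append_left _ hv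
        simp [pvNewOf, hv, hmem]
      · have hmem : nb ∉ v ++ PySem.Set.diff nl v := by
          intro hc
          rcases List.mem_append.mp hc with h1 | h2
          · exact hv h1
          · exact hnl ((PySem.Set.mem_diff nl v nb).mp h2).1
        simp [pvNewOf, hv, hmem, List.append_assoc]

theorem pv_fold_update_diff (nd : List (Int × List Int)) (L : List Int) :
    ∀ (nl v : List Int),
    PySem.Set.diff (L.foldl (fun a x => PySem.Set.update a (pvGetNbrs nd x)) nl) v
    = PySem.Set.diff nl v ++ pvLayerNew nd (v ++ PySem.Set.diff nl v) L := by
  induction L with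
  | nil => intro nl v; simp [pvLayerNew]
  | cons x xs ih =>
    intro nl v
    rw [List.foldl_cons, ih (PySem.Set.update nl (pvGetNbrs nd x)) v, pv_diff_update]
    simp [pvLayerNew, List.append_assoc]

theorem pv_next_eq (nd : List (Int × List Int)) (L v : List Int) :
    PySem.Set.diff
      (L.foldl (fun a x => PySem.Set.update a (pvGetNbrs nd x)) PySem.Set.empty) v
    = pvLayerNew nd v L := by
  have h := pv_fold_update_diff nd L PySem.Set.empty v
  simpa [PySem.Set.diff, PySem.Set.empty] using h

theorem pv_nodup_fold_update (nd : List (Int × List Int)) (L : List Int) :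
    ∀ (a : List Int), a.Nodup →
    (L.foldl (fun a x => PySem.Set.update a (pvGetNbrs nd x)) a).Nodup := by
  induction L with
  | nil => intro a ha; simpa using ha
  | cons x xs ih =>
    intro a ha
    have h := PySem.Set.nodup_update a (pvGetNbrs nd x) ha
    exact ih _ h

theorem pv_layerNew_nodup (nd : List (Int × List Int)) (L v : List Int) :
    (pvLayerNew nd v L).Nodup := by
  rw [← pv_next_eq nd L v]
  exact PySem.Set.nodup_diff _ _ (pv_nodup_fold_update nd L [] List.nodup_nil)

theorem pv_layerNew_not_mem (nd : List (Int × List Int)) (L v : List Int) :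
    ∀ x ∈ pvLayerNew nd v L, x ∉ v := by
  intro x hx
  rw [← pv_next_eq nd L v] at hx
  exact ((PySem.Set.mem_diff _ _ _).mp hx).2

theorem pv_main (nd : List (Int × List Int)) (depth : Int) :
    ∀ (k : Nat) (d : Int), ((k = 0 ∧ ¬ d < depth) ∨ depth = d + k) →
    ∀ (v L : List Int) (f : Nat),
    pvBfsGo nd depth (pvFuelFor nd k v L + f) (L.map (fun x => (x, d))) v
    = (pvLoopA nd k (v, L)).1 := by
  intro k
  induction k with
  | zero =>
    intro d hk v L f
    have hd : ¬ d < depth := by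
      rcases hk with ⟨_, h⟩ | h
      · exact h
      · omega
    simpa [pvFuelFor, pvLoopA] using pv_bfs_drain nd depth d hd L v f
  | succ k ih =>
    intro d hk v L f
    have hdep : depth = d + (k + 1 : Nat) := by
      rcases hk with ⟨h0, _⟩ | h
      · exact absurd h0 (Nat.succ_ne_zero k)
      · exact h
    have hd : d < depth := by omega
    have hfuel : pvFuelFor nd (k + 1) v L + f
        = L.length + (pvFuelFor nd k (v ++ pvLayerNew nd v L) (pvLayerNew nd v L) + f) := by
      simp [pvFuelFor]; omega
    rw [hfuel]
    have hq : L.map (fun x => (x, d))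
        = L.map (fun x => (x, d)) ++ ([] : List Int).map (fun x => (x, d + 1)) := by simp
    rw [hq, pv_bfs_layer nd depth d hd L [] v _]
    have hk' : ((k = 0 ∧ ¬ (d + 1) < depth) ∨ depth = (d + 1) + k) := by
      right; omega
    have hrec := ih (d + 1) hk' (v ++ pvLayerNew nd v L) (pvLayerNew nd v L) f
    simp only [List.nil_append]
    rw [hrec]
    -- now unfold one step of A's loop
    have hnext : pvStepA nd (v, L) = (v ++ pvLayerNew nd v L, pvLayerNew nd v L) := by
      have h1 := pv_next_eq nd L v
      simp only [PySem.Set.empty] at h1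
      have h2 : PySem.Set.update v (pvLayerNew nd v L) = v ++ pvLayerNew nd v L :=
        PySem.Set.update_eq_append_of_disjoint v (pvLayerNew nd v L)
          (pv_layerNew_nodup nd L v) (pv_layerNew_not_mem nd L v)
      simp [pvStepA, h1, h2]
    simp [pvLoopA, hnext]

theorem pv_getNbrs_sub (nd : List (Int × List Int)) (x y : Int)
    (hy : y ∈ pvGetNbrs nd x) : y ∈ nd.flatMap (fun p => p.2) := by
  unfold pvGetNbrs at hy
  rcases hfind : nd.find? (fun p => p.1 == x) with _ | p
  · rw [hfind] at hy; simp at hy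
  · rw [hfind] at hy
    exact List.mem_flatMap.mpr ⟨p, List.mem_of_find?_eq_some hfind, hy⟩

theorem pv_newOf_sub (ns : List Int) : ∀ (v : List Int),
    ∀ x ∈ pvNewOf v ns, x ∈ ns := by
  induction ns with
  | nil => intro v x hx; simp [pvNewOf] at hx
  | cons nb nbs ih =>
    intro v x hx
    by_cases h : nb ∈ v
    · simp only [pvNewOf, if_pos h] at hx
      exact List.mem_cons_of_mem _ (ih v x hx)
    · simp only [pvNewOf, if_neg h] at hx
      rcases List.mem_cons.mp hx with hx | hx
      · simp [hx]
      · exact List.mem_cons_of_mem _ (ih (v ++ [nb]) x hx)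

theorem pv_layerNew_sub (nd : List (Int × List Int)) (L : List Int) :
    ∀ (v : List Int), ∀ x ∈ pvLayerNew nd v L, x ∈ nd.flatMap (fun p => p.2) := by
  induction L with
  | nil => intro v x hx; simp [pvLayerNew] at hx
  | cons z zs ih =>
    intro v x hx
    simp only [pvLayerNew] at hx
    rcases List.mem_append.mp hx with h | h
    · exact pv_getNbrs_sub nd z x (pv_newOf_sub _ v x h)
    · exact ih _ x h

theorem pv_layerNew_len (nd : List (Int × List Int)) (L v : List Int) :
    (pvLayerNew nd v L).length ≤ (nd.flatMap (fun p => p.2)).length :=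
  (List.Nodup.subperm (pv_layerNew_nodup nd L v)
    (fun _ hx => pv_layerNew_sub nd L v _ hx)).length_le

theorem pv_fuelFor_le (nd : List (Int × List Int)) :
    ∀ (k : Nat) (v L : List Int),
    pvFuelFor nd k v L ≤ L.length + k * (nd.flatMap (fun p => p.2)).length := by
  intro k
  induction k with
  | zero => intro v L; simp [pvFuelFor]
  | succ k ih =>
    intro v L
    have h1 := ih (v ++ pvLayerNew nd v L) (pvLayerNew nd v L)
    have h2 := pv_layerNew_len nd L v
    simp only [pvFuelFor]
    calc L.length + pvFuelFor nd k (v ++ pvLayerNew nd v L) (pvLayerNew nd v L)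
        ≤ L.length + ((pvLayerNew nd v L).length + k * (nd.flatMap (fun p => p.2)).length) := by omega
      _ ≤ L.length + (k + 1) * (nd.flatMap (fun p => p.2)).length := by
          have hm : (k + 1) * (nd.flatMap (fun p => p.2)).length
              = k * (nd.flatMap (fun p => p.2)).length
                + (nd.flatMap (fun p => p.2)).length := by ring
          omega

-- ===== VERDICT (by name: the statement is the Claim_ definition above) =====
theorem snowball_sampling_spec : Claim_equal_snowball_sampling := by
  unfold Claim_equal_snowball_sampling Spec_snowball_sampling
  intro nd seed depth _
  unfold snowball_sampling snowball_sampling_alt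
  have hseed : PySem.Set.ofList [seed] = [seed] := rfl
  rw [pv_foldl_stepA]
  have hlen : (PySem.List.pyRange 0 depth 1).length = depth.toNat := by
    rw [PySem.List.length_pyRange_one]; simp
  rw [hlen, hseed]
  have hk : ((depth.toNat = 0 ∧ ¬ (0 : Int) < depth) ∨ depth = 0 + (depth.toNat : Int)) := by
    omega
  have hbound := pv_fuelFor_le nd depth.toNat [seed] [seed]
  have hf : pvFuelFor nd depth.toNat [seed] [seed]
      + (1 + depth.toNat * (nd.flatMap (fun p => p.2)).length
          - pvFuelFor nd depth.toNat [seed] [seed])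
      = 1 + depth.toNat * (nd.flatMap (fun p => p.2)).length := by
    simp only [List.length_cons, List.length_nil] at hbound
    omega
  have hmain := pv_main nd depth depth.toNat 0 hk [seed] [seed]
    (1 + depth.toNat * (nd.flatMap (fun p => p.2)).length
      - pvFuelFor nd depth.toNat [seed] [seed])
  rw [hf] at hmain
  have hq : ([seed].map (fun x => (x, (0 : Int)))) = [(seed, (0 : Int))] := rfl
  rw [hq] at hmain
  rw [hmain]
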